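/- GENERATED by mk_final_copies.py from the proof of the farm's unit `start_decoder.R17` (farm:start_decoder.R17.1: Proof.lean) as the
   re-elaboration sweep compiled it — do not edit. -/
import Asan.CheckWalk
import Vorbis.Spec.Units.start_decoder_R17
import Vorbis.Spec.Worked.start_decoder_R17_Lemmas
open X86 X86.User Asan Vorbis Vorbis.Spec Vorbis.Spec.StartDecoder

set_option maxRecDepth 4000
set_option maxHeartbeats 4000000

/-! Segment R17 of `start_decoder` (0x116059 … 0x116100; stb_vorbis_fixed.c 4189, 4200 – 4217): the head of the estimate loop
4189, then `temp_memory_required = max(classify_mem, imdct_mem)` (T1) and the final arena test (ARENA-FIX 1).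
From `AtR17` (the loop invariant `EstLoop` with `Late … 12`) to `AtR18` (`i < residue_count`), `AtR19` (T1 and `FinalTest`) or
`AtERR` (after `error(f, VORBIS_outofmem)`, eax = 0). ONE walk over all paths; the arm `alloc_buffer == NULL` of line 4213 is
pruned by the walker from the named load `r70` (AR5: `alloc_buffer = B`, AR1: `0 < B`). Every exit assertion is rebuilt from ONE
`Mem.SameExcept` fact about the segment's footprint (`r17_carry`, Lemmas.lean: the return addresses below rsp, `f + 12`, `f + 140`).
The lemmas of this unit (namespace `Vorbis.Spec.start_decoder_R17`) are in Lemmas.lean. -/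

/-- Segment `start_decoder.R17` takes its entry assertion to one of its three exit assertions. -/
theorem Vorbis.Spec.Worked.start_decoder_R17_ok : Vorbis.Spec.start_decoder_R17.Statement := by
  intro Lay hLay μ hμ u₀ hcode hload4 hstore4 hload8 herror g i v hat
  obtain ⟨A9, A10, A, hb⟩ := hat
  have hfr := hb.frame
  have hlate := hb.late
  have hhand := hb.hand
  -- 1. the entry state's facts
  have he := hfr.entry
  v_entry he
  simp only [depth] at he_room he_stack
  -- the steady stack pointer and `*f` as numbers
  obtain ⟨hR1, hR8⟩ := hfr.r_eq
  have hRA : g.RA = (g.e.reg .rsp).toNat := rfl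
  simp only [steady] at hR1
  rw [hRA] at hR1
  obtain ⟨hf1, hf2, hf3⟩ := Vorbis.Spec.start_decoder_R17.obj_where hfr hhand
  have hlive : LiveIn A.2 g.frames' g.f Off.sizeof.stb_vorbis :=
    hhand.obj.mono (Vorbis.Spec.start_decoder_R17.frames_sub g A.2)
  -- 2. the present state: the registers (under names the walker does not take over), the code span, DF / MXCSR
  have w_rip := hfr.rip
  have hrsp := hfr.rsp
  have hrbp := hb.rbp
  have hrspN : (v.reg .rsp).toNat = g.R := by
    rw [hrsp]
    exact toNat_addr _ (by omega)
  have hrbpN : (v.reg .rbp).toNat = g.f := by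
    rw [hrbp]
    exact toNat_addr _ (by omega)
  have w_eq : Mem.EqOn Vorbis.L.textLo Vorbis.L.textHi u₀.mem v.mem := hfr.code
  have hdf : v.flags .df = false := (show abiInv _ from hfr.inv).1
  have hmx : v.mxcsr &&& 0x1F80 = 0x1F80 := (show abiInv _ from hfr.inv).2
  have hsse := Vorbis.sseOK_of_abiInv hfr.inv
  have herr := herror A.2 g.frames'
  -- 3. the values the segment loads, as numbers
  have hres := hlate.own.cfg.residue (by omega)
  -- residue_count
  have hrcR := hres.R1
  have hile := hb.i_le
  simp only [vacc, voff] at hrcR hile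
  obtain ⟨rc, hrcu, hrci, hrc31⟩ := Vorbis.Spec.start_decoder_R17.nat_of_i32 v.mem (g.f + 320) (by omega)
  rw [hrci] at hrcR hile
  -- channels
  have hchR := hlate.header.HD1
  simp only [vacc, voff] at hchR
  obtain ⟨C, hCu, hCi, hC31⟩ := Vorbis.Spec.start_decoder_R17.nat_of_i32 v.mem (g.f + 4) (by omega)
  rw [hCi] at hchR
  -- blocksize_1
  have hb1R := (HD3.range hlate.header.HD3).2.2
  have hb1lo := (HD3.range hlate.header.HD3).1
  have hb1mid := (HD3.range hlate.header.HD3).2.1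
  obtain ⟨b1, hb1⟩ : ∃ b1 : Nat, bsize v.mem g.f 1 = b1 := ⟨_, rfl⟩
  have hb1le : b1 ≤ 8192 := by
    rw [← hb1, bsize_one]
    omega
  have hr13 : v.reg .r13 = addr (2 * b1) := by
    rw [← hb1]
    exact hb.r13
  -- max_part_read so far
  obtain ⟨P, hP⟩ : ∃ P : Nat, maxPartRead v.mem g.f i = P := ⟨_, rfl⟩
  have hPle : P ≤ 8192 := by
    have := maxPartRead_le v.mem g.f i
    omega
  -- the arena's fields
  have har := hlate.arena
  have hTL := har.T_eq_L_of_nil hlate.noTemps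
  obtain ⟨hA1, hA2, hA3, hA4⟩ := har.AR1
  obtain ⟨hS1, hS2, hS3, hS4⟩ := har.AR2
  have hbuf := har.AR5.buffer
  have hset := har.AR5.setup
  have htmp := har.AR5.temp
  simp only [vacc, voff] at hbuf hset htmp
  obtain ⟨S, hSu, hSi, hS31⟩ := Vorbis.Spec.start_decoder_R17.nat_of_i32 v.mem (g.f + 128) (by omega)
  obtain ⟨T, hTu, hTi, hT31⟩ := Vorbis.Spec.start_decoder_R17.nat_of_i32 v.mem (g.f + 132) (by omega)
  -- the loads, named in the walker's form
  have r24 : v.mem.readLE (addr g.R + 36) 4 = i := by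
    have := hb.cnt
    simp only [Vorbis.Spec.StartDecoder.slot] at this
    simp only [vfield]
    exact this
  have r10 : v.mem.readLE (addr g.R + 16) 4 = P := by
    have := hb.est
    simp only [Vorbis.Spec.StartDecoder.slot] at this
    simp only [vfield]
    rw [this, hP]
  have r140 : v.mem.readLE (addr g.f + 320) 4 = rc := by
    simp only [vfield]
    exact hrcu
  have r4 : v.mem.readLE (addr g.f + 4) 4 = C := by
    simp only [vfield]
    exact hCu
  have r70 : v.mem.readLE (addr g.f + 112) 8 = A.1.B := by
    simp only [vfield]
    exact hbuf
  have r80 : v.mem.readLE (addr g.f + 128) 4 = S := by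
    simp only [vfield]
    exact hSu
  have r84 : v.mem.readLE (addr g.f + 132) 4 = T := by
    simp only [vfield]
    exact hTu
  u_walk hcode [hμ.vendor] until [Vorbis.L.start_decoder.cut325, Vorbis.L.start_decoder.cut326, Vorbis.L.start_decoder.cut4] span [Vorbis.L.textLo, Vorbis.L.textHi] side (v_side)
  · -- 0x116060: the check of `[f + 320]` (line 4189, `f->residue_count`): a field of `*f`
    have hun : ShadowUntouched v.mem s_116060.mem := by v_untouched
    refine hlive.accSmall hfr.shadow hun _ 4 (by decide) (by u_omega) ?_
    simp only [Vorbis.Off.sizeof.stb_vorbis]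
    u_omega
  · -- 0x116082: the check of `[f + 4]` (line 4200, `f->channels`): a field of `*f`
    have hun : ShadowUntouched v.mem s_116082.mem := by v_untouched
    refine hlive.accSmall hfr.shadow hun _ 4 (by decide) (by u_omega) ?_
    simp only [Vorbis.Off.sizeof.stb_vorbis]
    u_omega
  · -- 0x116094: the check of `[f + 12]` (line 4207, `f->temp_memory_required`): a field of `*f`
    have hun : ShadowUntouched v.mem s_116094.mem := by v_untouched
    refine hlive.accSmall hfr.shadow hun _ 4 (by decide) (by u_omega) ?_
    simp only [Vorbis.Off.sizeof.stb_vorbis]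
    u_omega
  · -- 0x1160aa: the check of `[f + 112]` (line 4213, `f->alloc.alloc_buffer`): a field of `*f`
    have hun : ShadowUntouched v.mem s_1160aa.mem := by v_untouched
    refine hlive.accSmall hfr.shadow hun _ 8 (by decide) (by u_omega) ?_
    simp only [Vorbis.Off.sizeof.stb_vorbis]
    u_omega
  · -- 0x1160c1: the check of `[f + 128]` (line 4216, `f->setup_offset`): a field of `*f`
    have hun : ShadowUntouched v.mem s_1160c1.mem := by v_untouched
    refine hlive.accSmall hfr.shadow hun _ 4 (by decide) (by u_omega) ?_
    simp only [Vorbis.Off.sizeof.stb_vorbis]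
    u_omega
  · -- 0x1160df: the check of `[f + 132]` (line 4216, `f->temp_offset`): a field of `*f`
    have hun : ShadowUntouched v.mem s_1160df.mem := by v_untouched
    refine hlive.accSmall hfr.shadow hun _ 4 (by decide) (by u_omega) ?_
    simp only [Vorbis.Off.sizeof.stb_vorbis]
    u_omega
  · -- `error`'s entry: DF = 0, the MXCSR masks
    v_inv
  · -- `error`'s precondition: the shadow layer at `rsp = R - 8`, `*f` inside one live object
    refine ⟨⟨?_, hfr.offText⟩, ?_⟩
    · have hun : ShadowUntouched v.mem s_1160fb.mem := by v_untouched
      have e : (s_1160fb.reg .rsp).toNat + 8 = g.R := by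
        rw [w_rsp]
        u_omega
      rw [e]
      exact hfr.shadow.untouched hun
    · have e : (s_1160fb.reg .rdi).toNat = g.f := by
        rw [w_rdi]
        exact toNat_addr _ (by omega)
      rw [e]
      exact hlive
  · -- 0x1160aa: the check of `[f + 112]` (line 4213, `f->alloc.alloc_buffer`): a field of `*f`
    have hun : ShadowUntouched v.mem s_1160aa.mem := by v_untouched
    refine hlive.accSmall hfr.shadow hun _ 8 (by decide) (by u_omega) ?_
    simp only [Vorbis.Off.sizeof.stb_vorbis]
    u_omega
  · -- 0x1160c1: the check of `[f + 128]` (line 4216, `f->setup_offset`): a field of `*f`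
    have hun : ShadowUntouched v.mem s_1160c1.mem := by v_untouched
    refine hlive.accSmall hfr.shadow hun _ 4 (by decide) (by u_omega) ?_
    simp only [Vorbis.Off.sizeof.stb_vorbis]
    u_omega
  · -- 0x1160df: the check of `[f + 132]` (line 4216, `f->temp_offset`): a field of `*f`
    have hun : ShadowUntouched v.mem s_1160df.mem := by v_untouched
    refine hlive.accSmall hfr.shadow hun _ 4 (by decide) (by u_omega) ?_
    simp only [Vorbis.Off.sizeof.stb_vorbis]
    u_omega
  · -- `error`'s entry: DF = 0, the MXCSR masks
    v_inv
  · -- `error`'s precondition: the shadow layer at `rsp = R - 8`, `*f` inside one live object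
    refine ⟨⟨?_, hfr.offText⟩, ?_⟩
    · have hun : ShadowUntouched v.mem s_1160fb.mem := by v_untouched
      have e : (s_1160fb.reg .rsp).toNat + 8 = g.R := by
        rw [w_rsp]
        u_omega
      rw [e]
      exact hfr.shadow.untouched hun
    · have e : (s_1160fb.reg .rdi).toNat = g.f := by
        rw [w_rdi]
        exact toNat_addr _ (by omega)
      rw [e]
      exact hlive
  · -- 0x116784 (line 4189, `i < f->residue_count`): the exit to R18
    have hs : Mem.SameExcept [⟨g.R - 64, g.R⟩, ⟨g.f + 12, g.f + 16⟩, ⟨g.f + 140, g.f + 144⟩] v.mem s_11606f.mem := by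
      u_same
    have hinv : abiInv s_11606f := by v_inv
    obtain ⟨hfr', hlate', hobj', hkept', hslots'⟩ :=
      Vorbis.Spec.start_decoder_R17.r17_carry (pc' := pc_R18) hfr hhand hlate w_rip w_rsp w_eq hinv hs
    have hloop := Vorbis.Spec.start_decoder_R17.estLoop_carry hb hfr' hlate' hobj' hkept' hslots'
      (w_kept .rbp rfl) (w_kept .r13 rfl) (w_kept .r15 rfl)
    refine ReachVia.done (Or.inl ⟨A9, A10, A, hloop, ?_⟩)
    -- `i < residue_count`: the `jg` was taken
    have erc : stb_vorbis.residue_count s_11606f.mem g.f = stb_vorbis.residue_count v.mem g.f := by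
      simp only [vacc, voff]
      exact hobj'.i32 320 (by decide)
    rw [erc]
    simp only [vacc, voff]
    rw [hrci]
    rw [Vorbis.Spec.start_decoder_R17.r17_toInt i (by omega),
      Vorbis.Spec.start_decoder_R17.r17_toInt rc hrc31] at hbr_11606f
    exact hbr_11606f
  · -- 0x11682e (line 4216, the final test passed): the exit to R19, with T1 and the final test
    have hs : Mem.SameExcept [⟨g.R - 64, g.R⟩, ⟨g.f + 12, g.f + 16⟩, ⟨g.f + 140, g.f + 144⟩] v.mem s_1160ed.mem := by
      u_same
    have hinv : abiInv s_1160ed := by v_inv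
    obtain ⟨hfr', hlate', hobj', hkept', hslots'⟩ :=
      Vorbis.Spec.start_decoder_R17.r17_carry (pc' := pc_R19) hfr hhand hlate w_rip w_rsp w_eq hinv hs
    -- the loop has ended: `i = residue_count`
    rw [Vorbis.Spec.start_decoder_R17.r17_toInt i (by omega),
      Vorbis.Spec.start_decoder_R17.r17_toInt rc hrc31] at hbr_11606f
    have hi : stb_vorbis.residue_count v.mem g.f = (i : Int) := by
      simp only [vacc, voff]
      rw [hrci]
      omega
    -- the value stored at `f + 12`: `classify_mem`, not below `2·b1` (the `jae` was taken)
    rw [Vorbis.Spec.start_decoder_R17.sext_nat P (by omega)] at hbr_1160a0 hbr_1160ed w_mem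
    rw [Vorbis.Spec.start_decoder_R17.classify_val P C hPle (by omega)] at hbr_1160a0 hbr_1160ed w_mem
    rw [Vorbis.Spec.start_decoder_R17.part_2b1 b1 hb1le] at hbr_1160a0
    have hcl := Res.classify_le (C := C) (P := P) (by omega) hPle
    rw [← Res.classify_eq C P] at hcl
    obtain ⟨x, hx⟩ : ∃ x : Nat, (P + 1) * C * 8 = x := ⟨_, rfl⟩
    rw [hx] at hbr_1160a0 hbr_1160ed w_mem hcl
    have hmax : x = max ((P + 1) * C * 8) (2 * b1) := by
      rw [hx]
      omega
    have hfit := Vorbis.Spec.start_decoder_R17.fit_val S x T hS31 (by omega) (by omega) hbr_1160ed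
    -- the value read back
    have e1 : s_1160ed.mem.readLE (addr g.f + 12) 4 = x := by
      rw [w_mem]
      u_read
    simp only [vfield] at e1
    have hCn : nchan v.mem g.f = C := by
      rw [nchan_def]
      simp only [vacc, voff]
      rw [hCi]
      exact Int.toNat_natCast C
    have hfit' : A.1.S + x + 1872 ≤ A.1.T := by
      rw [hSi] at hset
      rw [hTi] at htmp
      omega
    obtain ⟨hT1, hFT⟩ := Vorbis.Spec.start_decoder_R17.r19_exit hlate hlate' hobj' hkept' hi hP hCn hb1 e1 hmax hfit'
    refine ReachVia.done (Or.inr (Or.inl ⟨A9, A10, A, ⟨hfr', hhand, hlate', ?_, hT1, hFT⟩⟩))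
    rw [w_kept .rbp rfl]
    exact hrbp
  · -- 0x116100 (line 4217, `return error(f, VORBIS_outofmem)`): after `error`, `jmp 113b22`: the exit to ERR with eax = 0
    v_after_call w_rsp_1160fb w_mem_1160fb
    simp only [w_rdi_1160fb] at w_same
    obtain ⟨w_rax, hun', hval⟩ := w_post
    u_walk hcode [hμ.vendor] until [Vorbis.L.start_decoder.cut4] span [Vorbis.L.textLo, Vorbis.L.textHi] side (v_side)
    have hs : Mem.SameExcept [⟨g.R - 64, g.R⟩, ⟨g.f + 12, g.f + 16⟩, ⟨g.f + 140, g.f + 144⟩] v.mem s_116100.mem := by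
      rw [w_mem]
      u_same
    have hinv : abiInv s_116100 := by v_inv
    obtain ⟨hfr', hlate', _, _, _⟩ :=
      Vorbis.Spec.start_decoder_R17.r17_carry (pc' := pc_ERR) hfr hhand hlate w_rip w_rsp w_eq hinv hs
    refine ReachVia.done (Or.inr (Or.inr ⟨A, ⟨hfr', hhand, Or.inl ⟨?_, Vorbis.Spec.start_decoder_R17.late_failed hlate'⟩⟩⟩))
    rw [w_rax]
    rfl
  · -- 0x11682e (line 4216, the final test passed): the exit to R19, with T1 and the final test
    have hs : Mem.SameExcept [⟨g.R - 64, g.R⟩, ⟨g.f + 12, g.f + 16⟩, ⟨g.f + 140, g.f + 144⟩] v.mem s_1160ed.mem := by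
      u_same
    have hinv : abiInv s_1160ed := by v_inv
    obtain ⟨hfr', hlate', hobj', hkept', hslots'⟩ :=
      Vorbis.Spec.start_decoder_R17.r17_carry (pc' := pc_R19) hfr hhand hlate w_rip w_rsp w_eq hinv hs
    -- the loop has ended: `i = residue_count`
    rw [Vorbis.Spec.start_decoder_R17.r17_toInt i (by omega),
      Vorbis.Spec.start_decoder_R17.r17_toInt rc hrc31] at hbr_11606f
    have hi : stb_vorbis.residue_count v.mem g.f = (i : Int) := by
      simp only [vacc, voff]
      rw [hrci]
      omega
    -- the value stored at `f + 12`: `2·b1`, above `classify_mem` (the `jae` was not taken)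
    rw [Vorbis.Spec.start_decoder_R17.sext_nat P (by omega)] at hbr_1160a0
    rw [Vorbis.Spec.start_decoder_R17.classify_val P C hPle (by omega)] at hbr_1160a0
    rw [Vorbis.Spec.start_decoder_R17.part_2b1 b1 hb1le] at hbr_1160a0 hbr_1160ed w_mem
    obtain ⟨x, hx⟩ : ∃ x : Nat, 2 * b1 = x := ⟨_, rfl⟩
    rw [hx] at hbr_1160a0 hbr_1160ed w_mem
    have hcl : x ≤ 1048704 := by omega
    have hmax : x = max ((P + 1) * C * 8) (2 * b1) := by
      rw [hx]
      omega
    have hfit := Vorbis.Spec.start_decoder_R17.fit_val S x T hS31 (by omega) (by omega) hbr_1160ed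
    -- the value read back
    have e1 : s_1160ed.mem.readLE (addr g.f + 12) 4 = x := by
      rw [w_mem]
      u_read
    simp only [vfield] at e1
    have hCn : nchan v.mem g.f = C := by
      rw [nchan_def]
      simp only [vacc, voff]
      rw [hCi]
      exact Int.toNat_natCast C
    have hfit' : A.1.S + x + 1872 ≤ A.1.T := by
      rw [hSi] at hset
      rw [hTi] at htmp
      omega
    obtain ⟨hT1, hFT⟩ := Vorbis.Spec.start_decoder_R17.r19_exit hlate hlate' hobj' hkept' hi hP hCn hb1 e1 hmax hfit'
    refine ReachVia.done (Or.inr (Or.inl ⟨A9, A10, A, ⟨hfr', hhand, hlate', ?_, hT1, hFT⟩⟩))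
    rw [w_kept .rbp rfl]
    exact hrbp
  · -- 0x116100 (line 4217, `return error(f, VORBIS_outofmem)`): after `error`, `jmp 113b22`: the exit to ERR with eax = 0
    v_after_call w_rsp_1160fb w_mem_1160fb
    simp only [w_rdi_1160fb] at w_same
    obtain ⟨w_rax, hun', hval⟩ := w_post
    u_walk hcode [hμ.vendor] until [Vorbis.L.start_decoder.cut4] span [Vorbis.L.textLo, Vorbis.L.textHi] side (v_side)
    have hs : Mem.SameExcept [⟨g.R - 64, g.R⟩, ⟨g.f + 12, g.f + 16⟩, ⟨g.f + 140, g.f + 144⟩] v.mem s_116100.mem := by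
      rw [w_mem]
      u_same
    have hinv : abiInv s_116100 := by v_inv
    obtain ⟨hfr', hlate', _, _, _⟩ :=
      Vorbis.Spec.start_decoder_R17.r17_carry (pc' := pc_ERR) hfr hhand hlate w_rip w_rsp w_eq hinv hs
    refine ReachVia.done (Or.inr (Or.inr ⟨A, ⟨hfr', hhand, Or.inl ⟨?_, Vorbis.Spec.start_decoder_R17.late_failed hlate'⟩⟩⟩))
    rw [w_rax]
    rfl
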